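-- pv_equiv track=rewrite | github.com/SquareShiftTech/tableau-to-looker-accelerator | src/tableau_to_looker_parser/handlers/parameter_handler.py | _clean_field_name
-- ===== SOURCE A (Python) =====
-- def _clean_field_name(name: str) -> str:
--     """Clean a Tableau field name for LookML.
--
--     Args:
--         name: Raw field name like "[Parameter 1]"
--
--     Returns:
--         str: Clean name like "parameter_1"
--     """
--     # Remove brackets
--     name = name.strip("[]")
--
--     # Convert to lowercase
--     name = name.lower()
--
--     # Replace spaces and special chars with underscore
--     name = "".join(c if c.isalnum() else "_" for c in name)
--
--     # Remove duplicate underscores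
--     while "__" in name:
--         name = name.replace("__", "_")
--
--     # Remove leading/trailing underscores
--     name = name.strip("_")
--
--     return name
-- ===== SOURCE B (Python) =====
-- def _clean_field_name(name: str) -> str:
--     """Clean a Tableau field name for LookML: join the lowercased
--     alphanumeric runs of the input with single underscores."""
--     words = []
--     current = []
--     for c in name.lower():
--         if c.isalnum():
--             current.append(c)
--         elif current:
--             words.append("".join(current))
--             current = []
--     if current:
--         words.append("".join(current))
--     return "_".join(words)
-- ===== Notes on version B (the rewrite author's own statement) =====
-- stated objective: alternative
-- what changed: Replaced A's strip-brackets / mask-to-underscores / repeated duplicate-underscore replacement fixpoint loop / final underscore-strip pipeline by a single tokenizing pass that collects maximal alphanumeric runs of the lowered input and joins them with single underscores.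
import Mathlib
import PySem

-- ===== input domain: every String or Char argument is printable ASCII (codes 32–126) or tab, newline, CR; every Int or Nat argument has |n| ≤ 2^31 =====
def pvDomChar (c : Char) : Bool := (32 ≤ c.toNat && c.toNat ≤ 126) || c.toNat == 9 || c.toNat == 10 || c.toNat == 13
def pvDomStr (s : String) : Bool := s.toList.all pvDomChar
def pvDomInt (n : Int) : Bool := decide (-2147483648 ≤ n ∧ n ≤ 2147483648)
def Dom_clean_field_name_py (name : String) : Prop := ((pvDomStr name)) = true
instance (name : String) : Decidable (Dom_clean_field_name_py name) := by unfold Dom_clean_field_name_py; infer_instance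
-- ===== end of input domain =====

-- B replaces A's mask / duplicate-underscore collapse loop / strip pipeline by one tokenizing pass
-- that joins the lowercased alphanumeric runs with single underscores (alternative decomposition).

-- ===== PORT A =====
-- Python's replace of a double underscore by a single one, written out for the fixed pattern (left-to-right,
-- non-overlapping); proved equal to PySem.Chars.replace below (pvReplace_eq).
def pvReplaceDu : List Char → List Char
  | [] => []
  | [c] => [c]
  | a :: b :: t => if a = '_' ∧ b = '_' then '_' :: pvReplaceDu t else a :: pvReplaceDu (b :: t)

-- the double-underscore membership test written out; proved equal to PySem.Chars.isIn below (pvIsIn_eq).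
def pvHasDu : List Char → Bool
  | [] => false
  | [_] => false
  | a :: b :: t => (a == '_' && b == '_') || pvHasDu (b :: t)

theorem pvReplaceDu_length_le (l : List Char) : (pvReplaceDu l).length ≤ l.length := by
  fun_induction pvReplaceDu l <;> simp_all <;> omega

theorem pvReplaceDu_length_lt (l : List Char) (h : pvHasDu l = true) :
    (pvReplaceDu l).length < l.length := by
  fun_induction pvReplaceDu l with
  | case1 => simp [pvHasDu] at h
  | case2 => simp [pvHasDu] at h
  | case3 a b t hab =>
    have := pvReplaceDu_length_le t
    simp only [List.length_cons]
    omega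
  | case4 a b t hab ih =>
    have h' : pvHasDu (b :: t) = true := by
      simp only [pvHasDu, Bool.or_eq_true, Bool.and_eq_true, beq_iff_eq] at h
      rcases h with ⟨h1, h2⟩ | h
      · exact absurd ⟨h1, h2⟩ hab
      · exact h
    simp only [List.length_cons]
    have := ih h'
    simp only [List.length_cons] at this
    omega

theorem pvReplace_go_eq (fuel : Nat) (l acc : List Char) (h : l.length ≤ fuel) :
    PySem.Chars.replace.go ['_', '_'] ['_'] fuel l acc = acc.reverse ++ pvReplaceDu l := by
  induction fuel generalizing l acc with
  | zero =>
    cases l with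
    | nil => simp [PySem.Chars.replace.go, pvReplaceDu]
    | cons c t => simp at h
  | succ n ih =>
    match l with
    | [] => simp [PySem.Chars.replace.go, pvReplaceDu]
    | [c] =>
      have hp : List.isPrefixOf ['_','_'] [c] = false := by
        simp [List.isPrefixOf]
      simp only [PySem.Chars.replace.go, hp, Bool.false_eq_true, if_false]
      have : PySem.Chars.replace.go ['_','_'] ['_'] n [] (c :: acc) = (c :: acc).reverse ++ pvReplaceDu [] :=
        ih [] (c :: acc) (by simp)
      simp [pvReplaceDu] at this ⊢
      simp [this]
    | a :: b :: t =>
      by_cases hab : a = '_' ∧ b = '_'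
      · obtain ⟨ha, hb⟩ := hab
        subst ha hb
        have hp : List.isPrefixOf ['_','_'] ('_' :: '_' :: t) = true := by
          simp [List.isPrefixOf]
        simp only [PySem.Chars.replace.go, hp, if_true]
        have hlen : t.length ≤ n := by simp at h; omega
        rw [show (List.drop (List.length ['_','_']) ('_' :: '_' :: t)) = t by simp]
        rw [ih t _ hlen]
        simp [pvReplaceDu]
      · have hp : List.isPrefixOf ['_','_'] (a :: b :: t) = false := by
          rcases (not_and_or.mp hab) with ha | hb
          · simp [List.isPrefixOf]; intro h'; exact absurd h'.symm ha
          · simp [List.isPrefixOf]; intro _ h'; exact absurd h'.symm hb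
        simp only [PySem.Chars.replace.go, hp, Bool.false_eq_true, if_false]
        rw [ih (b :: t) _ (by simp at h ⊢; omega)]
        simp only [pvReplaceDu, if_neg hab]
        simp

theorem pvReplace_eq (l : List Char) :
    PySem.Chars.replace l ['_', '_'] ['_'] = pvReplaceDu l := by
  have := pvReplace_go_eq l.length l [] (Nat.le_refl _)
  simpa [PySem.Chars.replace] using this

theorem pvInfix_iff (l : List Char) : (['_', '_'] <:+: l) ↔ pvHasDu l = true := by
  induction l with
  | nil => simp [pvHasDu]
  | cons a t ih =>
    match t, ih with
    | [], _ => simp [pvHasDu, List.infix_cons_iff, List.IsPrefix]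
    | b :: t', ih =>
      rw [List.infix_cons_iff]
      constructor
      · rintro (hpre | hin)
        · obtain ⟨r, hr⟩ := hpre
          simp at hr
          obtain ⟨ha, hb, -⟩ := hr
          subst ha hb
          simp [pvHasDu]
        · simp [pvHasDu, ih.mp hin]
      · intro h
        rw [pvHasDu] at h
        simp only [Bool.or_eq_true, Bool.and_eq_true, beq_iff_eq] at h
        rcases h with ⟨ha, hb⟩ | h
        · subst ha hb; exact Or.inl ⟨t', by simp⟩
        · exact Or.inr (ih.mpr h)

theorem pvIsIn_eq (l : List Char) : PySem.Chars.isIn ['_', '_'] l = pvHasDu l := by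
  by_cases h : pvHasDu l = true
  · rw [h, (PySem.Chars.isIn_iff_infix _ _).mpr ((pvInfix_iff l).mpr h)]
  · simp only [Bool.not_eq_true] at h
    rw [h, (PySem.Chars.isIn_eq_false_iff _ _).mpr (fun hc => by simp [(pvInfix_iff l).mp hc] at h)]

-- the while-loop that repeatedly replaces double underscores by single ones
def pvCollapse (l : List Char) : List Char :=
  if PySem.Chars.isIn ['_', '_'] l then pvCollapse (PySem.Chars.replace l ['_', '_'] ['_']) else l
termination_by l.length
decreasing_by
  rw [pvReplace_eq]
  exact pvReplaceDu_length_lt _ (by rwa [← pvIsIn_eq])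

-- 'c if c.isalnum() else "_"'
def pvMaskChar (c : Char) : Char := if PySem.Chars.isalnum c then c else '_'

def clean_field_name_py (name : String) : String :=
  let s1 := PySem.Chars.stripChars name.toList ['[', ']']   -- name.strip("[]")
  let s2 := PySem.Chars.lower s1                            -- name.lower()
  let s3 := s2.map pvMaskChar                               -- "".join(... for c in name)
  let s4 := pvCollapse s3                                   -- the while loop
  String.ofList (PySem.Chars.stripChars s4 ['_'])               -- the final strip of underscores

-- ===== PORT B =====
-- one step of B's for-loop: state = (words, current)
def pvStepB (st : List (List Char) × List Char) (c : Char) : List (List Char) × List Char :=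
  if PySem.Chars.isalnum c then (st.1, st.2 ++ [c])
  else if st.2 ≠ [] then (st.1 ++ [st.2], []) else st

def clean_field_name_py_alt (name : String) : String :=
  let st := (PySem.Chars.lower name.toList).foldl pvStepB ([], [])
  let words := if st.2 ≠ [] then st.1 ++ [st.2] else st.1
  String.ofList (PySem.Chars.join ['_'] words)                  -- the underscore join of words

-- ===== PRECONDITION & SPEC =====
def Spec_clean_field_name_py (name : String) (out : String) : Prop := out = clean_field_name_py_alt name
instance (name : String) (out : String) : Decidable (Spec_clean_field_name_py name out) := by unfold Spec_clean_field_name_py; infer_instance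

-- ===== CLAIM (what is proved, stated in full; the proofs are below) =====
def Claim_equal_clean_field_name_py : Prop := ∀ (name : String), Dom_clean_field_name_py name → Spec_clean_field_name_py name (clean_field_name_py name)

-- ===== LEMMAS AND PROOFS =====

def pvIsU (c : Char) : Bool := (['_'] : List Char).contains c

-- one-pass collapse of underscore runs: the fixpoint A's while-loop reaches
def pvDedup : List Char → List Char
  | [] => []
  | [c] => [c]
  | a :: b :: t => if a = '_' ∧ b = '_' then pvDedup (b :: t) else a :: pvDedup (b :: t)

-- the maximal alphanumeric runs of l, in order
def pvToks : List Char → List (List Char)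
  | [] => []
  | c :: r =>
    if PySem.Chars.isalnum c
    then (c :: r.takeWhile PySem.Chars.isalnum) :: pvToks (r.dropWhile PySem.Chars.isalnum)
    else pvToks r
termination_by l => l.length
decreasing_by
  · exact Nat.lt_succ_of_le (List.length_dropWhile_le _ _)
  · exact Nat.lt_succ_of_le (Nat.le_refl _)

def pvJoinU : List (List Char) → List Char
  | [] => []
  | w :: ws => w ++ (if ws = [] then [] else '_' :: pvJoinU ws)

-- B's fold, with the pending current run made explicit
def pvToksPre (cur : List Char) : List Char → List (List Char)
  | [] => if cur = [] then [] else [cur]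
  | c :: r =>
    if PySem.Chars.isalnum c then pvToksPre (cur ++ [c]) r
    else if cur = [] then pvToksPre [] r else cur :: pvToksPre [] r

def pvStripU (x : List Char) : List Char := ((x.dropWhile pvIsU).reverse.dropWhile pvIsU).reverse

theorem pvIsU_iff (c : Char) : pvIsU c = true ↔ c = '_' := by simp [pvIsU]

theorem pvIsU_underscore : pvIsU '_' = true := by decide

theorem pvStripChars_underscore (s : List Char) :
    PySem.Chars.stripChars s ['_'] = pvStripU s := rfl

theorem pvToks_nil : pvToks [] = [] := by rw [pvToks.eq_def]

theorem pvToks_cons_pos {c : Char} {r : List Char} (hc : PySem.Chars.isalnum c = true) :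
    pvToks (c :: r)
      = (c :: r.takeWhile PySem.Chars.isalnum) :: pvToks (r.dropWhile PySem.Chars.isalnum) := by
  rw [pvToks.eq_def]; simp [hc]

theorem pvToks_cons_neg {c : Char} {r : List Char} (hc : PySem.Chars.isalnum c = false) :
    pvToks (c :: r) = pvToks r := by
  rw [pvToks.eq_def]; simp [hc]

theorem pvDedup_head? (x : List Char) : (pvDedup x).head? = x.head? := by
  fun_induction pvDedup x with
  | case1 => rfl
  | case2 => rfl
  | case3 a b t hab ih => rw [ih]; simp [hab.1, hab.2]
  | case4 a b t hab ih => rfl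

theorem pvDropU_of_head (x : List Char) (h : x.head? ≠ some '_') : x.dropWhile pvIsU = x := by
  cases x with
  | nil => rfl
  | cons a t =>
    simp at h
    rw [List.dropWhile_cons_of_neg (by simp [pvIsU_iff, h])]

theorem pvDedup_cons_u (x : List Char) :
    pvDedup ('_' :: x) = '_' :: pvDedup (x.dropWhile pvIsU) := by
  induction x with
  | nil => rfl
  | cons b t ih =>
    by_cases hb : b = '_'
    · subst hb
      rw [show pvDedup ('_' :: '_' :: t) = pvDedup ('_' :: t) from if_pos ⟨rfl, rfl⟩]
      rw [ih, List.dropWhile_cons_of_pos pvIsU_underscore]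
    · rw [show pvDedup ('_' :: b :: t) = '_' :: pvDedup (b :: t) from
        if_neg (fun h => hb h.2)]
      rw [List.dropWhile_cons_of_neg (by simp [pvIsU_iff, hb])]

theorem pvDedup_dropU (x : List Char) :
    pvDedup (x.dropWhile pvIsU) = (pvDedup x).dropWhile pvIsU := by
  induction x with
  | nil => rfl
  | cons a t ih =>
    by_cases ha : a = '_'
    · subst ha
      rw [List.dropWhile_cons_of_pos pvIsU_underscore, pvDedup_cons_u,
          List.dropWhile_cons_of_pos pvIsU_underscore, ih, List.dropWhile_idempotent]
    · rw [List.dropWhile_cons_of_neg (by simp [pvIsU_iff, ha]),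
          pvDropU_of_head _ (by rw [pvDedup_head?]; simp [ha])]

theorem pvReplaceDu_head? (x : List Char) : (pvReplaceDu x).head? = x.head? := by
  fun_induction pvReplaceDu x with
  | case1 => rfl
  | case2 => rfl
  | case3 a b t hab ih => simp [hab.1]
  | case4 a b t hab ih => rfl

theorem pvDedup_replaceDu (x : List Char) : pvDedup (pvReplaceDu x) = pvDedup x := by
  fun_induction pvReplaceDu x with
  | case1 => rfl
  | case2 => rfl
  | case3 a b t hab ih =>
    obtain ⟨ha, hb⟩ := hab; subst ha; subst hb
    rw [pvDedup_cons_u, pvDedup_dropU, ih, ← pvDedup_dropU, ← pvDedup_cons_u]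
    exact (if_pos ⟨rfl, rfl⟩).symm
  | case4 a b t hab ih =>
    have hsh : pvReplaceDu (b :: t) = b :: (pvReplaceDu (b :: t)).tail := by
      have := pvReplaceDu_head? (b :: t)
      cases hx : pvReplaceDu (b :: t) with
      | nil => rw [hx] at this; simp at this
      | cons y ys => rw [hx] at this; simp at this; simp [this]
    rw [hsh]
    rw [show pvDedup (a :: b :: (pvReplaceDu (b :: t)).tail)
        = a :: pvDedup (b :: (pvReplaceDu (b :: t)).tail) from if_neg hab]
    rw [← hsh, ih]
    exact (if_neg hab).symm

theorem pvDedup_of_not_hasDu (x : List Char) (h : pvHasDu x = false) : pvDedup x = x := by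
  fun_induction pvHasDu x with
  | case1 => rfl
  | case2 => rfl
  | case3 a b t ih =>
    simp only [Bool.or_eq_false_iff, Bool.and_eq_false_iff, beq_eq_false_iff_ne, ne_eq] at h
    rw [show pvDedup (a :: b :: t) = a :: pvDedup (b :: t) from
      if_neg (fun hc => by rcases h.1 with h1 | h1 <;> [exact h1 hc.1; exact h1 hc.2])]
    rw [ih h.2]

theorem pvCollapse_eq_dedup (l : List Char) : pvCollapse l = pvDedup l := by
  rw [pvCollapse]
  by_cases h : pvHasDu l = true
  · rw [if_pos (by rw [pvIsIn_eq, h])]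
    rw [pvReplace_eq, pvCollapse_eq_dedup (pvReplaceDu l), pvDedup_replaceDu]
  · rw [if_neg (by rw [pvIsIn_eq]; simpa using h)]
    rw [pvDedup_of_not_hasDu l (by simpa using h)]
termination_by l.length
decreasing_by
  exact pvReplaceDu_length_lt _ h

theorem pvAlnum_ne_underscore (c : Char) (h : PySem.Chars.isalnum c = true) : c ≠ '_' := by
  rintro rfl
  exact absurd h (by decide)

theorem pvHead?_dropWhile_false {p : Char → Bool} (l : List Char) (c : Char)
    (h : (l.dropWhile p).head? = some c) : p c = false := by
  induction l with
  | nil => simp at h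
  | cons a t ih =>
    by_cases hp : p a
    · rw [List.dropWhile_cons_of_pos hp] at h; exact ih h
    · rw [List.dropWhile_cons_of_neg hp] at h
      simp at h; subst h; simpa using hp

theorem pvToks_ne_nil (l : List Char) : ∀ w ∈ pvToks l, w ≠ [] := by
  fun_induction pvToks l with
  | case1 => simp
  | case2 c r hc ih =>
    intro w hw
    rcases List.mem_cons.mp hw with rfl | hw'
    · simp
    · exact ih w hw'
  | case3 c r hc ih => exact ih

theorem pvJoinU_nil_iff (l : List Char) : pvJoinU (pvToks l) = [] ↔ pvToks l = [] := by
  constructor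
  · intro h
    cases hx : pvToks l with
    | nil => rfl
    | cons w ws =>
      have hw := pvToks_ne_nil l w (by rw [hx]; simp)
      rw [hx, pvJoinU] at h
      rcases List.append_eq_nil_iff.mp h with ⟨h1, -⟩
      exact absurd h1 hw
  · intro h; rw [h]; rfl

-- pvDedup through a nonempty all-non-underscore prefix
theorem pvDedup_append (w x : List Char) (hw : w ≠ []) (hall : ∀ a ∈ w, a ≠ '_') :
    pvDedup (w ++ x) = w ++ pvDedup x := by
  induction w with
  | nil => exact absurd rfl hw
  | cons a w' ih =>
    have ha : a ≠ '_' := hall a (by simp)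
    cases w' with
    | nil =>
      cases x with
      | nil => rfl
      | cons b t =>
        simp only [List.cons_append, List.nil_append]
        rw [show pvDedup (a :: b :: t) = a :: pvDedup (b :: t) from if_neg (fun h => ha h.1)]
    | cons a2 w'' =>
      simp only [List.cons_append]
      rw [show pvDedup (a :: a2 :: (w'' ++ x)) = a :: pvDedup (a2 :: (w'' ++ x)) from
        if_neg (fun h => ha h.1)]
      have := ih (by simp) (fun b hb => hall b (List.mem_cons_of_mem a hb))
      simp only [List.cons_append] at this
      rw [this]

theorem pvDropU_all_ne (w : List Char) (hall : ∀ a ∈ w, a ≠ '_') :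
    w.dropWhile pvIsU = w := by
  cases w with
  | nil => rfl
  | cons a t => exact pvDropU_of_head _ (by simp; exact fun h => hall a (by simp) h)

-- the rstrip of (w ++ d) for w nonempty with no underscores
theorem pvRstrip_append (w d : List Char) (hw : w ≠ []) (hall : ∀ a ∈ w, a ≠ '_') :
    ((w ++ d).reverse.dropWhile pvIsU).reverse = w ++ (d.reverse.dropWhile pvIsU).reverse := by
  rw [List.reverse_append, List.dropWhile_append]
  by_cases he : (d.reverse.dropWhile pvIsU).isEmpty
  · have he' : d.reverse.dropWhile pvIsU = [] := List.isEmpty_iff.mp he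
    rw [if_pos he, he', pvDropU_all_ne w.reverse (fun a ha => hall a (by simpa using ha)),
        List.reverse_reverse]
    simp
  · rw [if_neg he]
    simp

-- mask of an all-alnum list is itself
theorem pvMask_all_alnum (w : List Char) (hall : ∀ a ∈ w, PySem.Chars.isalnum a = true) :
    w.map pvMaskChar = w := by
  have h : ∀ a ∈ w, pvMaskChar a = id a := fun a ha => by simp [pvMaskChar, hall a ha]
  rw [List.map_congr_left h, List.map_id]

-- ===== the core: A's pipeline computes the joined tokens =====
theorem pvCore (l : List Char) :
    pvStripU (pvDedup (l.map pvMaskChar)) = pvJoinU (pvToks l) := by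
  cases l with
  | nil => rw [pvToks_nil]; rfl
  | cons c r =>
    by_cases hc : PySem.Chars.isalnum c
    · -- alphanumeric head: peel the whole run
      have hw : (c :: r.takeWhile PySem.Chars.isalnum) ≠ [] := by simp
      have hallw : ∀ a ∈ c :: r.takeWhile PySem.Chars.isalnum, a ≠ '_' := by
        intro a ha
        rcases List.mem_cons.mp ha with rfl | ha'
        · exact pvAlnum_ne_underscore a hc
        · exact pvAlnum_ne_underscore a (List.mem_takeWhile_imp ha')
      have hmask : (c :: r).map pvMaskChar
          = (c :: r.takeWhile PySem.Chars.isalnum) ++ (r.dropWhile PySem.Chars.isalnum).map pvMaskChar := by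
        have : r = r.takeWhile PySem.Chars.isalnum ++ r.dropWhile PySem.Chars.isalnum :=
          (List.takeWhile_append_dropWhile).symm
        calc (c :: r).map pvMaskChar
            = pvMaskChar c :: r.map pvMaskChar := rfl
          _ = c :: r.map pvMaskChar := by rw [show pvMaskChar c = c from by simp [pvMaskChar, hc]]
          _ = c :: (r.takeWhile PySem.Chars.isalnum ++ r.dropWhile PySem.Chars.isalnum).map pvMaskChar := by rw [← this]
          _ = _ := by
            rw [List.map_append, pvMask_all_alnum _ (fun a ha => List.mem_takeWhile_imp ha)]
            rfl
      rw [hmask, pvDedup_append _ _ hw hallw, pvStripU]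
      simp only [List.cons_append]
      rw [List.dropWhile_cons_of_neg (by
        simp only [pvIsU_iff]
        exact hallw c (by simp))]
      rw [← List.cons_append,
          pvRstrip_append _ _ hw hallw]
      rw [pvToks_cons_pos hc]
      rw [pvJoinU]
      congr 1
      -- remains: rstrip (pvDedup (mask rest)) = if-join of rest
      have hih := pvCore (r.dropWhile PySem.Chars.isalnum)
      generalize hrest : r.dropWhile PySem.Chars.isalnum = rest at hih ⊢
      cases rest with
      | nil =>
        rw [pvToks_nil, show pvDedup (List.map pvMaskChar []) = [] from by rw [pvDedup.eq_def]; rfl]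
        simp [pvJoinU]
      | cons d rest' =>
        have hd : PySem.Chars.isalnum d = false :=
          pvHead?_dropWhile_false (p := PySem.Chars.isalnum) r d (by rw [hrest]; rfl)
        have hmask2 : (d :: rest').map pvMaskChar = '_' :: rest'.map pvMaskChar := by
          simp [pvMaskChar, hd]
        have hD : (pvDedup ((rest'.map pvMaskChar).dropWhile pvIsU)).head? ≠ some '_' := by
          rw [pvDedup_head?]
          intro h
          have h2 := pvHead?_dropWhile_false (p := pvIsU) (rest'.map pvMaskChar) '_' h
          rw [pvIsU_underscore] at h2
          exact absurd h2 (by simp)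
        have hih2 : ((pvDedup ((rest'.map pvMaskChar).dropWhile pvIsU)).reverse.dropWhile pvIsU).reverse
            = pvJoinU (pvToks (d :: rest')) := by
          rw [← hih, hmask2, pvDedup_cons_u, pvStripU,
              List.dropWhile_cons_of_pos pvIsU_underscore,
              pvDropU_of_head _ hD]
        rw [hmask2, pvDedup_cons_u]
        rw [show ('_' :: pvDedup ((rest'.map pvMaskChar).dropWhile pvIsU)).reverse
            = (pvDedup ((rest'.map pvMaskChar).dropWhile pvIsU)).reverse ++ ['_'] from by simp]
        rw [List.dropWhile_append]
        by_cases he : ((pvDedup ((rest'.map pvMaskChar).dropWhile pvIsU)).reverse.dropWhile pvIsU).isEmpty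
        · have he' : (pvDedup ((rest'.map pvMaskChar).dropWhile pvIsU)).reverse.dropWhile pvIsU = [] :=
            List.isEmpty_iff.mp he
          have hj : pvJoinU (pvToks (d :: rest')) = [] := by rw [← hih2, he']; rfl
          rw [if_pos he, (pvJoinU_nil_iff _).mp hj]
          simp [pvIsU]
        · rw [if_neg he, List.reverse_append, hih2]
          have hne : pvToks (d :: rest') ≠ [] := by
            intro h0
            apply he
            rw [List.isEmpty_iff]
            rw [h0] at hih2
            have h3 : ((pvDedup ((rest'.map pvMaskChar).dropWhile pvIsU)).reverse.dropWhile pvIsU).reverse = [] := by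
              rw [hih2]; rfl
            simpa using h3
          rw [if_neg hne]
          rfl
    · -- non-alphanumeric head: it is stripped / skipped
      have hc' : PySem.Chars.isalnum c = false := by simpa using hc
      have hmask : (c :: r).map pvMaskChar = '_' :: r.map pvMaskChar := by
        simp [pvMaskChar, hc']
      have hih := pvCore r
      have hls : (pvDedup ('_' :: r.map pvMaskChar)).dropWhile pvIsU
          = (pvDedup (r.map pvMaskChar)).dropWhile pvIsU := by
        rw [pvDedup_cons_u, List.dropWhile_cons_of_pos pvIsU_underscore,
            pvDropU_of_head _ (by
              rw [pvDedup_head?]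
              intro h
              have h2 := pvHead?_dropWhile_false (p := pvIsU) (r.map pvMaskChar) '_' h
              rw [pvIsU_underscore] at h2
              exact absurd h2 (by simp)),
            pvDedup_dropU]
      rw [hmask, pvToks_cons_neg hc', ← hih, pvStripU, pvStripU, hls]
termination_by l.length
decreasing_by
  · exact Nat.lt_succ_of_le (List.length_dropWhile_le _ _)
  · exact Nat.lt_succ_of_le (Nat.le_refl _)

-- ===== tokenizer vs. B's fold, and invariance under bracket stripping =====

theorem pvToks_all_neg (s : List Char) (hs : ∀ c ∈ s, PySem.Chars.isalnum c = false) :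
    pvToks s = [] := by
  induction s with
  | nil => exact pvToks_nil
  | cons c r ih =>
    rw [pvToks_cons_neg (hs c (by simp))]
    exact ih (fun a ha => hs a (List.mem_cons_of_mem c ha))

theorem pvToks_prefix (p m : List Char) (hp : ∀ c ∈ p, PySem.Chars.isalnum c = false) :
    pvToks (p ++ m) = pvToks m := by
  induction p with
  | nil => rfl
  | cons a p' ih =>
    rw [List.cons_append, pvToks_cons_neg (hp a (by simp))]
    exact ih (fun c hc => hp c (List.mem_cons_of_mem a hc))

theorem pvTakeWhile_append_all {p : Char → Bool} (l x : List Char)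
    (h : ∀ a ∈ l, p a = true) : (l ++ x).takeWhile p = l ++ x.takeWhile p := by
  induction l with
  | nil => rfl
  | cons a t ih =>
    rw [List.cons_append, List.takeWhile_cons_of_pos (h a (by simp)),
        ih (fun b hb => h b (List.mem_cons_of_mem a hb)), List.cons_append]

theorem pvDropWhile_append_all {p : Char → Bool} (l x : List Char)
    (h : ∀ a ∈ l, p a = true) : (l ++ x).dropWhile p = x.dropWhile p := by
  induction l with
  | nil => rfl
  | cons a t ih =>
    rw [List.cons_append, List.dropWhile_cons_of_pos (h a (by simp))]
    exact ih (fun b hb => h b (List.mem_cons_of_mem a hb))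

theorem pvTakeWhile_append_stuck {p : Char → Bool} (l x : List Char)
    (h : l.dropWhile p ≠ []) : (l ++ x).takeWhile p = l.takeWhile p := by
  induction l with
  | nil => exact absurd rfl h
  | cons a t ih =>
    by_cases hp : p a
    · rw [List.cons_append, List.takeWhile_cons_of_pos hp, List.takeWhile_cons_of_pos hp,
          ih (by rwa [List.dropWhile_cons_of_pos hp] at h)]
    · rw [List.cons_append, List.takeWhile_cons_of_neg hp, List.takeWhile_cons_of_neg hp]

theorem pvDropWhile_append_stuck {p : Char → Bool} (l x : List Char)
    (h : l.dropWhile p ≠ []) : (l ++ x).dropWhile p = l.dropWhile p ++ x := by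
  rw [List.dropWhile_append, if_neg (by simpa [List.isEmpty_iff] using h)]

theorem pvToks_suffix (m s : List Char) (hs : ∀ c ∈ s, PySem.Chars.isalnum c = false) :
    pvToks (m ++ s) = pvToks m := by
  cases m with
  | nil =>
    rw [List.nil_append, pvToks_nil]
    exact pvToks_all_neg s hs
  | cons c r =>
    by_cases hc : PySem.Chars.isalnum c
    · rw [List.cons_append, pvToks_cons_pos hc, pvToks_cons_pos hc]
      by_cases hdw : r.dropWhile PySem.Chars.isalnum = []
      · have htw : r.takeWhile PySem.Chars.isalnum = r := by
          have h0 := List.takeWhile_append_dropWhile (p := PySem.Chars.isalnum) (l := r)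
          rwa [hdw, List.append_nil] at h0
        have hall : ∀ a ∈ r, PySem.Chars.isalnum a = true := by
          intro a ha
          rw [← htw] at ha
          exact List.mem_takeWhile_imp ha
        have hts : s.takeWhile PySem.Chars.isalnum = [] := by
          cases s with
          | nil => rfl
          | cons d s' => rw [List.takeWhile_cons_of_neg (by simp [hs d (by simp)])]
        have hds : s.dropWhile PySem.Chars.isalnum = s := by
          cases s with
          | nil => rfl
          | cons d s' => rw [List.dropWhile_cons_of_neg (by simp [hs d (by simp)])]
        rw [pvTakeWhile_append_all r s hall, pvDropWhile_append_all r s hall,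
            hts, hds, htw, hdw, List.append_nil, pvToks_all_neg s hs, pvToks_nil]
      · rw [pvTakeWhile_append_stuck r s hdw, pvDropWhile_append_stuck r s hdw,
            pvToks_suffix (r.dropWhile PySem.Chars.isalnum) s hs]
    · rw [List.cons_append, pvToks_cons_neg (by simpa using hc), pvToks_cons_neg (by simpa using hc)]
      exact pvToks_suffix r s hs
termination_by m.length
decreasing_by
  · exact Nat.lt_succ_of_le (List.length_dropWhile_le _ _)
  · exact Nat.lt_succ_of_le (Nat.le_refl _)

theorem pvStrip_decomp (s chars : List Char) :
    ∃ p q, s = p ++ PySem.Chars.stripChars s chars ++ q ∧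
      (∀ c ∈ p, c ∈ chars) ∧ (∀ c ∈ q, c ∈ chars) := by
  refine ⟨s.takeWhile (fun c => chars.contains c),
          ((s.dropWhile (fun c => chars.contains c)).reverse.takeWhile (fun c => chars.contains c)).reverse,
          ?_, ?_, ?_⟩
  · have h1 := (List.takeWhile_append_dropWhile
      (p := fun c => chars.contains c) (l := s)).symm
    have h2 := (List.takeWhile_append_dropWhile
      (p := fun c => chars.contains c) (l := (s.dropWhile (fun c => chars.contains c)).reverse)).symm
    calc s = s.takeWhile (fun c => chars.contains c) ++ s.dropWhile (fun c => chars.contains c) := h1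
      _ = s.takeWhile (fun c => chars.contains c)
          ++ ((s.dropWhile (fun c => chars.contains c)).reverse).reverse := by rw [List.reverse_reverse]
      _ = _ := by
          conv_lhs => rw [h2]
          rw [List.reverse_append]
          unfold PySem.Chars.stripChars
          simp [List.append_assoc]
  · intro c hc
    have := List.mem_takeWhile_imp hc
    simpa using this
  · intro c hc
    rw [List.mem_reverse] at hc
    have := List.mem_takeWhile_imp hc
    simpa using this

theorem pvFoldB_spec (l : List Char) (ws : List (List Char)) (cur : List Char) :
    (if (l.foldl pvStepB (ws, cur)).2 ≠ [] then
        (l.foldl pvStepB (ws, cur)).1 ++ [(l.foldl pvStepB (ws, cur)).2]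
      else (l.foldl pvStepB (ws, cur)).1) = ws ++ pvToksPre cur l := by
  induction l generalizing ws cur with
  | nil =>
    by_cases hcur : cur = [] <;> simp [pvToksPre, hcur]
  | cons c r ih =>
    rw [List.foldl_cons]
    by_cases hc : PySem.Chars.isalnum c
    · rw [show pvStepB (ws, cur) c = (ws, cur ++ [c]) from by simp [pvStepB, hc]]
      rw [ih, pvToksPre, if_pos hc]
    · by_cases hcur : cur = []
      · subst hcur
        rw [show pvStepB (ws, []) c = (ws, []) from by simp [pvStepB, hc]]
        rw [ih, pvToksPre, if_neg (by simpa using hc), if_pos rfl]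
      · rw [show pvStepB (ws, cur) c = (ws ++ [cur], []) from by simp [pvStepB, hc, hcur]]
        rw [ih, pvToksPre, if_neg (by simpa using hc), if_neg hcur]
        simp

theorem pvToksPre_spec (l : List Char) :
    pvToksPre [] l = pvToks l ∧
    ∀ cur, cur ≠ [] → pvToksPre cur l
      = (cur ++ l.takeWhile PySem.Chars.isalnum) :: pvToks (l.dropWhile PySem.Chars.isalnum) := by
  induction l with
  | nil =>
    constructor
    · rw [pvToks_nil]; rfl
    · intro cur h
      rw [pvToksPre, if_neg h]
      simp [pvToks_nil]
  | cons c r ih =>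
    constructor
    · by_cases hc : PySem.Chars.isalnum c
      · rw [pvToksPre, if_pos hc, List.nil_append, ih.2 [c] (by simp), pvToks_cons_pos hc]
        simp
      · rw [pvToksPre, if_neg (by simpa using hc), if_pos rfl, ih.1,
            pvToks_cons_neg (by simpa using hc)]
    · intro cur hcur
      by_cases hc : PySem.Chars.isalnum c
      · rw [pvToksPre, if_pos hc, ih.2 (cur ++ [c]) (by simp),
            List.takeWhile_cons_of_pos hc, List.dropWhile_cons_of_pos hc]
        simp
      · rw [pvToksPre, if_neg (by simpa using hc), if_neg hcur, ih.1,
            List.takeWhile_cons_of_neg hc, List.dropWhile_cons_of_neg hc,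
            pvToks_cons_neg (by simpa using hc)]
        simp

theorem pvJoin_eq (ws : List (List Char)) : PySem.Chars.join ['_'] ws = pvJoinU ws := by
  induction ws with
  | nil => rw [PySem.Chars.join_nil]; rfl
  | cons w ws ih =>
    cases ws with
    | nil => rw [PySem.Chars.join_singleton, pvJoinU, if_pos rfl, List.append_nil]
    | cons v t =>
      rw [PySem.Chars.join_cons_cons, ih,
          show pvJoinU (w :: v :: t) = w ++ ('_' :: pvJoinU (v :: t)) from by
            rw [pvJoinU, if_neg (by simp)]]
      simp

theorem pvBracket_lower_neg (c : Char) (h : c ∈ (['[', ']'] : List Char)) :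
    PySem.Chars.isalnum (PySem.Chars.lowerChar c) = false := by
  rcases List.mem_cons.mp h with rfl | h'
  · decide
  · rcases List.mem_cons.mp h' with rfl | h''
    · decide
    · simp at h''

-- ===== VERDICT (by name: the statement is the Claim_ definition above) =====
theorem clean_field_name_py_spec : Claim_equal_clean_field_name_py := by
  unfold Claim_equal_clean_field_name_py
  intro name _hdom
  unfold Spec_clean_field_name_py clean_field_name_py clean_field_name_py_alt
  simp only []
  refine congrArg String.ofList ?_
  rw [pvStripChars_underscore, pvCollapse_eq_dedup, pvCore, pvJoin_eq]
  have hf := pvFoldB_spec (PySem.Chars.lower name.toList) [] []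
  simp only [List.nil_append] at hf
  rw [hf, (pvToksPre_spec _).1]
  congr 1
  obtain ⟨p, q, hs, hp, hq⟩ := pvStrip_decomp name.toList ['[', ']']
  conv_rhs => rw [hs]
  rw [show PySem.Chars.lower (p ++ PySem.Chars.stripChars name.toList ['[', ']'] ++ q)
      = PySem.Chars.lower p ++ (PySem.Chars.lower (PySem.Chars.stripChars name.toList ['[', ']'])
        ++ PySem.Chars.lower q) from by simp [PySem.Chars.lower]]
  rw [pvToks_prefix _ _ (by
    intro c hc
    simp only [PySem.Chars.lower, List.mem_map] at hc
    obtain ⟨c', hc', rfl⟩ := hc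
    exact pvBracket_lower_neg c' (hp c' hc'))]
  rw [pvToks_suffix _ _ (by
    intro c hc
    simp only [PySem.Chars.lower, List.mem_map] at hc
    obtain ⟨c', hc', rfl⟩ := hc
    exact pvBracket_lower_neg c' (hq c' hc'))]
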